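-- pv_equiv track=rewrite | github.com/eposte-lab/SolarLD | apps/api/src/services/google_places_service.py | _normalise_punctuation
-- ===== SOURCE A (Python) =====
-- def _normalise_punctuation(name: str) -> str:
--     """The opposite — try to add dots where the listing might use them.
--
--     'MULTILOG SPA' → 'MULTILOG S.P.A.'  Best-effort, only applies to
--     well-known Italian corporate suffixes at the end of the name.
--     """
--     out = name.strip()
--     suffix_map = {
--         " SPA": " S.P.A.",
--         " SRL": " S.R.L.",
--         " SAS": " S.A.S.",
--         " SNC": " S.N.C.",
--     }
--     upper = out.upper()
--     for raw_suffix, dotted_suffix in suffix_map.items():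
--         if upper.endswith(raw_suffix):
--             return out[: -len(raw_suffix)] + dotted_suffix
--     return out
-- ===== SOURCE B (Python) =====
-- _SUFFIXES = {"SPA", "SRL", "SAS", "SNC"}
--
--
-- def _normalise_punctuation(name: str) -> str:
--     """Dot a well-known Italian corporate suffix at the end of the name."""
--     out = name.strip()
--     words = out.split(' ')
--     last_upper = words[-1].upper()
--     if len(words) >= 2 and last_upper in _SUFFIXES:
--         return out[:-len(words[-1])] + '.'.join(last_upper) + '.'
--     return out
-- ===== Notes on version B (the rewrite author's own statement) =====
-- stated objective: simpler
-- what changed: Replaces the four-entry suffix dict and the endswith scan by tokenizing on spaces: inspect the last word, check it against a set of bare suffixes, and build the dotted form by joining its letters with dots instead of using a lookup table.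
import Mathlib
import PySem

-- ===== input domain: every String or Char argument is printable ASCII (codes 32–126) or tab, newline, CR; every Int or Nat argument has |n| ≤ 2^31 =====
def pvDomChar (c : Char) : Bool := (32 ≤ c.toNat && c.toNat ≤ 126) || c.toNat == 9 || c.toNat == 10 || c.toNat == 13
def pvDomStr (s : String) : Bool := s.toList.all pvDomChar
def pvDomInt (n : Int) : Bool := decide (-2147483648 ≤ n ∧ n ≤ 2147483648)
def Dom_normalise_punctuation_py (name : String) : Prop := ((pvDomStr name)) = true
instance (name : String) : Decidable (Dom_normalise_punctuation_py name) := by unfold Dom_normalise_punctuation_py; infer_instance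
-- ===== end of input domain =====

-- B tokenizes on spaces and dots the last word when it is a bare Italian corporate suffix,
-- replacing A's four-entry dict and endswith scan; objective: simpler. No mutation in either version.

-- ===== PORT A =====
-- A's loop over the 4-entry literal dict, unrolled in insertion order; string work on List Char
-- (PySem.Chars gives Python str semantics); the String wrapper only converts at the boundary.
def pvACore (l : List Char) : List Char :=
  let out := PySem.Chars.strip l
  let upper := PySem.Chars.upper out
  if PySem.Chars.endswith upper (" SPA".toList) = true then
    PySem.Chars.slice out none (some (-4)) ++ " S.P.A.".toList
  else if PySem.Chars.endswith upper (" SRL".toList) = true then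
    PySem.Chars.slice out none (some (-4)) ++ " S.R.L.".toList
  else if PySem.Chars.endswith upper (" SAS".toList) = true then
    PySem.Chars.slice out none (some (-4)) ++ " S.A.S.".toList
  else if PySem.Chars.endswith upper (" SNC".toList) = true then
    PySem.Chars.slice out none (some (-4)) ++ " S.N.C.".toList
  else out

def normalise_punctuation_py (name : String) : String := String.ofList (pvACore name.toList)

-- ===== PORT B =====
-- out.split(' ') is PySem.Chars.splitOn out [' ']; words[-1] is getLastD (split never returns []);
-- the set literal is PySem.Set.ofList; '.'.join(lastUpper) is PySem.Chars.join over singleton chars.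
def pvBCore (l : List Char) : List Char :=
  let out := PySem.Chars.strip l
  let words := PySem.Chars.splitOn out [' ']
  let lastWord := words.getLastD []
  let lastUpper := PySem.Chars.upper lastWord
  if 2 ≤ words.length ∧
      lastUpper ∈ PySem.Set.ofList ["SPA".toList, "SRL".toList, "SAS".toList, "SNC".toList] then
    PySem.Chars.slice out none (some (-(lastWord.length : Int)))
      ++ PySem.Chars.join ['.'] (lastUpper.map (fun c => [c])) ++ ['.']
  else out

def normalise_punctuation_py_alt (name : String) : String := String.ofList (pvBCore name.toList)

-- ===== PRECONDITION & SPEC =====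
def Spec_normalise_punctuation_py (name : String) (out : String) : Prop := out = normalise_punctuation_py_alt name
instance (name : String) (out : String) : Decidable (Spec_normalise_punctuation_py name out) := by unfold Spec_normalise_punctuation_py; infer_instance

-- ===== CLAIM (what is proved, stated in full; the proofs are below) =====
def Claim_equal_normalise_punctuation_py : Prop := ∀ (name : String), Dom_normalise_punctuation_py name → Spec_normalise_punctuation_py name (normalise_punctuation_py name)

-- ===== LEMMAS AND PROOFS =====

def pvSp (c : Char) : List Char → List (List Char)
  | [] => [[]]
  | a :: l =>
    if a = c then [] :: pvSp c l
    else
      match pvSp c l with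
      | [] => [[a]]
      | x :: xs => (a :: x) :: xs

def pvPrep (p : List Char) : List (List Char) → List (List Char)
  | [] => [p]
  | x :: xs => (p ++ x) :: xs

def pvTail (c : Char) (l : List Char) : List Char := (l.reverse.takeWhile (· ≠ c)).reverse

lemma pvSp_ne_nil (c : Char) (l : List Char) : pvSp c l ≠ [] := by
  cases l with
  | nil => simp [pvSp]
  | cons a l =>
    simp only [pvSp]
    split
    · simp
    · split <;> simp

lemma pvSp_length_pos (c : Char) (l : List Char) : 1 ≤ (pvSp c l).length := by
  cases h : pvSp c l
  · exact absurd h (pvSp_ne_nil c l)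
  · simp

lemma pvGetLastD_irrel (L : List (List Char)) (h : L ≠ []) (d d' : List Char) :
    L.getLastD d = L.getLastD d' := by
  cases L with
  | nil => exact absurd rfl h
  | cons x xs =>
    rcases hq : (x :: xs).getLast? with _ | v
    · have hs : (x :: xs).getLast?.isSome := List.getLast?_isSome.mpr (by simp)
      rw [hq] at hs; simp at hs
    · simp [List.getLastD]

lemma pvGo_eq (c : Char) (fuel : Nat) (l cur : List Char) (acc : List (List Char))
    (h : l.length ≤ fuel) :
    PySem.Chars.splitOn.go [c] fuel l cur acc = acc.reverse ++ pvPrep cur.reverse (pvSp c l) := by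
  induction fuel generalizing l cur acc with
  | zero =>
    have : l = [] := by cases l <;> simp_all
    subst this
    simp [PySem.Chars.splitOn.go, pvSp, pvPrep]
  | succ n ih =>
    cases l with
    | nil => simp [PySem.Chars.splitOn.go, pvSp, pvPrep]
    | cons a rest =>
      simp only [PySem.Chars.splitOn.go]
      by_cases hac : a = c
      · have hp : [c].isPrefixOf (a :: rest) = true := by simp [List.isPrefixOf, hac]
        rw [if_pos hp]
        rw [ih _ _ _ (by simpa using h)]
        rcases hsp : pvSp c rest with _ | ⟨x, xs⟩
        · exact absurd hsp (pvSp_ne_nil c rest)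
        · simp [pvSp, pvPrep, hsp, hac]
      · have hp : ¬ ([c].isPrefixOf (a :: rest) = true) := by
          simp [List.isPrefixOf]
          exact fun h' => hac h'.symm
        rw [if_neg hp]
        rw [ih _ _ _ (by simpa using Nat.le_of_succ_le_succ (by simpa using h))]
        rcases hsp : pvSp c rest with _ | ⟨x, xs⟩
        · exact absurd hsp (pvSp_ne_nil c rest)
        · simp [pvSp, pvPrep, hsp, hac]

lemma pvSplitOn_single (c : Char) (l : List Char) :
    PySem.Chars.splitOn l [c] = pvSp c l := by
  show PySem.Chars.splitOn.go [c] (l.length + 1) l [] [] = pvSp c l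
  rw [pvGo_eq c (l.length + 1) l [] [] (by omega)]
  rcases hsp : pvSp c l with _ | ⟨x, xs⟩
  · exact absurd hsp (pvSp_ne_nil c l)
  · simp [pvPrep]

lemma pvSp_two_le (c : Char) (l : List Char) : 2 ≤ (pvSp c l).length ↔ c ∈ l := by
  induction l with
  | nil => simp [pvSp]
  | cons a l ih =>
    simp only [pvSp]
    by_cases hac : a = c
    · rw [if_pos hac]
      simp only [List.length_cons]
      have h1 := pvSp_length_pos c l
      constructor
      · intro _; exact List.mem_cons.mpr (Or.inl hac.symm)
      · intro _; omega
    · rw [if_neg hac]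
      rcases hsp : pvSp c l with _ | ⟨x, xs⟩
      · exact absurd hsp (pvSp_ne_nil c l)
      · rw [hsp] at ih
        have hca : ¬ c = a := fun h' => hac h'.symm
        simp only [List.length_cons] at ih ⊢
        simp [List.mem_cons, hca, ← ih]

lemma pvTail_cons_self (c : Char) (l : List Char) : pvTail c (c :: l) = pvTail c l := by
  unfold pvTail
  rw [List.reverse_cons, List.takeWhile_append]
  split_ifs with hlen
  · have heq := (List.takeWhile_prefix (l := l.reverse) (p := (· ≠ c))).eq_of_length hlen
    have h0 : List.takeWhile (· ≠ c) [c] = ([] : List Char) := by simp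
    rw [h0, heq]
    simp
  · rfl

lemma pvTail_cons_of_mem (c a : Char) (l : List Char) (hmem : c ∈ l) :
    pvTail c (a :: l) = pvTail c l := by
  unfold pvTail
  rw [List.reverse_cons, List.takeWhile_append]
  split_ifs with hlen
  · exfalso
    have heq := (List.takeWhile_prefix (l := l.reverse) (p := (· ≠ c))).eq_of_length hlen
    rw [List.takeWhile_eq_self_iff] at heq
    have := heq c (List.mem_reverse.mpr hmem)
    simp at this
  · rfl

lemma pvTail_of_not_mem (c : Char) (l : List Char) (hnm : c ∉ l) : pvTail c l = l := by
  unfold pvTail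
  have heq : List.takeWhile (· ≠ c) l.reverse = l.reverse := by
    rw [List.takeWhile_eq_self_iff]
    intro b hb
    simp only [ne_eq, decide_eq_true_eq]
    intro hbc; subst hbc
    exact hnm (List.mem_reverse.mp hb)
  rw [heq, List.reverse_reverse]

lemma pvSp_getLastD (c : Char) (l : List Char) : (pvSp c l).getLastD [] = pvTail c l := by
  induction l with
  | nil => simp [pvSp, pvTail]
  | cons a l ih =>
    simp only [pvSp]
    by_cases hac : a = c
    · rw [if_pos hac, List.getLastD_cons, ih, hac, pvTail_cons_self]
    · rw [if_neg hac]
      rcases hsp : pvSp c l with _ | ⟨x, xs⟩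
      · exact absurd hsp (pvSp_ne_nil c l)
      · rw [hsp] at ih
        by_cases hmem : c ∈ l
        · have hxs : xs ≠ [] := by
            have h2 := (pvSp_two_le c l).mpr hmem
            rw [hsp] at h2
            cases xs
            · simp at h2
            · simp
          rw [pvTail_cons_of_mem c a l hmem, ← ih]
          rw [List.getLastD_cons, List.getLastD_cons]
          exact pvGetLastD_irrel xs hxs _ _
        · have hxs : xs = [] := by
            have h2 := (pvSp_two_le c l).not.mpr hmem
            rw [hsp] at h2
            cases xs
            · rfl
            · simp at h2
          subst hxs
          have hx : x = l := by
            rw [List.getLastD_cons] at ih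
            simp only [List.getLastD_nil] at ih
            rw [ih, pvTail_of_not_mem c l hmem]
          have hnm2 : c ∉ a :: l := by
            intro h'
            rcases List.mem_cons.mp h' with h' | h'
            · exact hac h'.symm
            · exact hmem h'
          rw [hx, List.getLastD_cons]
          simp only [List.getLastD_nil]
          rw [pvTail_of_not_mem c (a :: l) hnm2]

lemma pvUpperChar_space (d : Char) (h : PySem.Chars.upperChar d = ' ') : d = ' ' := by
  by_cases hl : PySem.Chars.islower d = true
  · exfalso
    have hd : 97 ≤ d.toNat ∧ d.toNat ≤ 122 := by
      simp only [PySem.Chars.islower, Bool.and_eq_true, decide_eq_true_eq] at hl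
      exact ⟨hl.1, hl.2⟩
    rw [PySem.Chars.upperChar, if_pos hl] at h
    have hv : Nat.isValidChar (d.toNat - 32) := Or.inl (by omega)
    have h2 := congrArg Char.toNat h
    rw [Char.toNat_ofNat, if_pos hv] at h2
    have h32 : (' ' : Char).toNat = 32 := rfl
    rw [h32] at h2
    omega
  · rw [PySem.Chars.upperChar, if_neg hl] at h
    exact h

lemma pvTail_append (w r : List Char) (hr : ∀ x ∈ r, x ≠ ' ') :
    pvTail ' ' (w ++ ' ' :: r) = r := by
  unfold pvTail
  have hrev : (w ++ ' ' :: r).reverse = r.reverse ++ ' ' :: w.reverse := by simp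
  rw [hrev, List.takeWhile_append]
  have htr : List.takeWhile (· ≠ ' ') r.reverse = r.reverse := by
    rw [List.takeWhile_eq_self_iff]
    intro b hb
    simpa using hr b (List.mem_reverse.mp hb)
  rw [if_pos (by rw [htr])]
  have h1 : List.takeWhile (· ≠ ' ') (' ' :: w.reverse) = [] := by simp
  rw [h1, List.append_nil, List.reverse_reverse]

lemma pvDecomp (l : List Char) (h : ' ' ∈ l) :
    ∃ w, l = w ++ ' ' :: pvTail ' ' l := by
  have hsplit : List.takeWhile (· ≠ ' ') l.reverse ++ List.dropWhile (· ≠ ' ') l.reverse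
      = l.reverse := List.takeWhile_append_dropWhile
  have hdne : List.dropWhile (· ≠ ' ') l.reverse ≠ [] := by
    intro hnil
    rw [hnil, List.append_nil] at hsplit
    have hx : (' ' : Char) ∈ List.takeWhile (· ≠ ' ') l.reverse := by
      rw [hsplit]; exact List.mem_reverse.mpr h
    have := List.mem_takeWhile_imp hx
    simp at this
  obtain ⟨d, w', hdw⟩ : ∃ d w', List.dropWhile (· ≠ ' ') l.reverse = d :: w' := by
    cases hq : List.dropWhile (· ≠ ' ') l.reverse with
    | nil => exact absurd hq hdne
    | cons d w' => exact ⟨d, w', rfl⟩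
  have hd : d = ' ' := by
    have hh := List.head_dropWhile_not (p := (· ≠ ' ')) (l := l.reverse) hdne
    have h1 : (List.dropWhile (· ≠ ' ') l.reverse).head? = some d := by rw [hdw]; rfl
    have h2 := List.head?_eq_some_head (l := List.dropWhile (· ≠ ' ') l.reverse) hdne
    rw [h1] at h2
    have h3 := Option.some.inj h2
    simp only [ne_eq, decide_not] at hh h3
    simp at hh
    exact h3.trans hh
  have hrev : l.reverse = List.takeWhile (· ≠ ' ') l.reverse ++ ' ' :: w' := by
    rw [hdw, hd] at hsplit
    exact hsplit.symm
  have hl2 : l = (List.takeWhile (· ≠ ' ') l.reverse ++ ' ' :: w').reverse := by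
    have hc := congrArg List.reverse hrev
    rwa [List.reverse_reverse] at hc
  refine ⟨w'.reverse, ?_⟩
  conv_lhs => rw [hl2]
  unfold pvTail
  simp

lemma pvKey (l s : List Char) (hns : ∀ x ∈ s, x ≠ ' ') :
    (' ' :: s) <:+ PySem.Chars.upper l ↔
      (' ' ∈ l ∧ PySem.Chars.upper (pvTail ' ' l) = s) := by
  constructor
  · rintro ⟨t, ht⟩
    have hdrop : PySem.Chars.upper (l.drop t.length) = ' ' :: s := by
      have h1 : (PySem.Chars.upper l).drop t.length = ' ' :: s := by
        rw [← ht]; simp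
      rw [← h1]
      simp [PySem.Chars.upper, List.map_drop]
    obtain ⟨d, r, hdr⟩ : ∃ d r, l.drop t.length = d :: r := by
      cases hq : l.drop t.length with
      | nil => rw [hq] at hdrop; simp [PySem.Chars.upper] at hdrop
      | cons d r => exact ⟨d, r, rfl⟩
    have hd2 : PySem.Chars.upperChar d = ' ' ∧ PySem.Chars.upper r = s := by
      rw [hdr] at hdrop
      simp only [PySem.Chars.upper, List.map_cons, List.cons.injEq] at hdrop
      exact ⟨hdrop.1, hdrop.2⟩
    have hdsp : d = ' ' := pvUpperChar_space _ hd2.1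
    have hl : l = l.take t.length ++ ' ' :: r := by
      rw [← hdsp, ← hdr]; simp
    have hrne : ∀ x ∈ r, x ≠ ' ' := by
      intro x hx heq
      have hmem : PySem.Chars.upperChar x ∈ s := by
        rw [← hd2.2]
        exact List.mem_map_of_mem hx
      rw [heq] at hmem
      have hsp : PySem.Chars.upperChar ' ' = ' ' := by decide
      rw [hsp] at hmem
      exact hns _ hmem rfl
    refine ⟨by rw [hl]; simp, ?_⟩
    rw [hl, pvTail_append _ _ hrne, hd2.2]
  · rintro ⟨hmem, hup⟩
    obtain ⟨w, hw⟩ := pvDecomp l hmem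
    refine ⟨PySem.Chars.upper w, ?_⟩
    have hcong := congrArg PySem.Chars.upper hw
    rw [hcong]
    have hsp : PySem.Chars.upperChar ' ' = ' ' := by decide
    simp only [PySem.Chars.upper, List.map_append, List.map_cons, hsp]
    rw [show List.map PySem.Chars.upperChar (pvTail ' ' l) = s from hup]

lemma pvPos (out s ds : List Char) (h3 : s.length = 3)
    (hmem : ' ' ∈ out) (hup : PySem.Chars.upper (pvTail ' ' out) = s)
    (hds : PySem.Chars.join ['.'] (s.map (fun c => [c])) ++ ['.'] = ds) :
    PySem.Chars.slice out none (some (-4)) ++ (' ' :: ds)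
      = PySem.Chars.slice out none (some (-((pvTail ' ' out).length : Int)))
          ++ PySem.Chars.join ['.'] ((PySem.Chars.upper (pvTail ' ' out)).map (fun c => [c])) ++ ['.'] := by
  obtain ⟨w, hw⟩ := pvDecomp out hmem
  have hlt : (pvTail ' ' out).length = 3 := by
    have hc := congrArg List.length hup
    simp only [PySem.Chars.upper, List.length_map] at hc
    rw [hc, h3]
  have holen : out.length = w.length + 4 := by
    have hc := congrArg List.length hw
    simp [hlt] at hc
    omega
  have htake4 : out.take w.length = w := by
    conv_lhs => rw [hw]
    exact List.take_left
  have hw2 : out = (w ++ [' ']) ++ pvTail ' ' out := by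
    conv_lhs => rw [hw]
    simp
  have htake3 : out.take (w.length + 1) = w ++ [' '] := by
    conv_lhs => rw [hw2]
    rw [show w.length + 1 = (w ++ [' ']).length from by simp]
    exact List.take_left
  have h4 : PySem.Chars.slice out none (some (-4)) = w := by
    rw [PySem.Chars.slice_eq_listSlice, PySem.List.slice_to_neg_ofNat out 4 (by omega)]
    rw [show out.length - 4 = w.length from by omega]
    exact htake4
  have h3' : PySem.Chars.slice out none (some (-((pvTail ' ' out).length : Int))) = w ++ [' '] := by
    rw [hlt]
    rw [PySem.Chars.slice_eq_listSlice]
    rw [show ((3 : Nat) : Int) = (3 : Int) from by norm_num]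
    rw [PySem.List.slice_to_neg_ofNat out 3 (by omega)]
    rw [show out.length - 3 = w.length + 1 from by omega]
    exact htake3
  rw [h4, h3', hup, List.append_assoc (w ++ [' ']), hds]
  simp

set_option maxRecDepth 4096 in
lemma pvCore_eq (l : List Char) : pvACore l = pvBCore l := by
  unfold pvACore pvBCore
  dsimp only
  set out := PySem.Chars.strip l with hout
  have hW : PySem.Chars.splitOn out [' '] = pvSp ' ' out := pvSplitOn_single ' ' out
  have hlast : (PySem.Chars.splitOn out [' ']).getLastD [] = pvTail ' ' out := by
    rw [hW, pvSp_getLastD]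
  have hlen2 : 2 ≤ (PySem.Chars.splitOn out [' ']).length ↔ ' ' ∈ out := by
    rw [hW]; exact pvSp_two_le ' ' out
  have hSPA : "SPA".toList = ['S', 'P', 'A'] := by decide
  have hSRL : "SRL".toList = ['S', 'R', 'L'] := by decide
  have hSAS : "SAS".toList = ['S', 'A', 'S'] := by decide
  have hSNC : "SNC".toList = ['S', 'N', 'C'] := by decide
  have hA1 : PySem.Chars.endswith (PySem.Chars.upper out) (" SPA".toList) = true ↔
      (' ' ∈ out ∧ PySem.Chars.upper (pvTail ' ' out) = "SPA".toList) := by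
    rw [PySem.Chars.endswith_iff, show (" SPA".toList = ' ' :: "SPA".toList) from by decide]
    exact pvKey out "SPA".toList (by rw [hSPA]; simp)
  have hA2 : PySem.Chars.endswith (PySem.Chars.upper out) (" SRL".toList) = true ↔
      (' ' ∈ out ∧ PySem.Chars.upper (pvTail ' ' out) = "SRL".toList) := by
    rw [PySem.Chars.endswith_iff, show (" SRL".toList = ' ' :: "SRL".toList) from by decide]
    exact pvKey out "SRL".toList (by rw [hSRL]; simp)
  have hA3 : PySem.Chars.endswith (PySem.Chars.upper out) (" SAS".toList) = true ↔
      (' ' ∈ out ∧ PySem.Chars.upper (pvTail ' ' out) = "SAS".toList) := by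
    rw [PySem.Chars.endswith_iff, show (" SAS".toList = ' ' :: "SAS".toList) from by decide]
    exact pvKey out "SAS".toList (by rw [hSAS]; simp)
  have hA4 : PySem.Chars.endswith (PySem.Chars.upper out) (" SNC".toList) = true ↔
      (' ' ∈ out ∧ PySem.Chars.upper (pvTail ' ' out) = "SNC".toList) := by
    rw [PySem.Chars.endswith_iff, show (" SNC".toList = ' ' :: "SNC".toList) from by decide]
    exact pvKey out "SNC".toList (by rw [hSNC]; simp)
  have hmemset : PySem.Chars.upper ((PySem.Chars.splitOn out [' ']).getLastD []) ∈
        PySem.Set.ofList ["SPA".toList, "SRL".toList, "SAS".toList, "SNC".toList] ↔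
      (PySem.Chars.upper (pvTail ' ' out) = "SPA".toList ∨
        PySem.Chars.upper (pvTail ' ' out) = "SRL".toList ∨
        PySem.Chars.upper (pvTail ' ' out) = "SAS".toList ∨
        PySem.Chars.upper (pvTail ' ' out) = "SNC".toList) := by
    rw [hlast, PySem.Set.mem_ofList]
    simp
  by_cases hc1 : ' ' ∈ out ∧ PySem.Chars.upper (pvTail ' ' out) = "SPA".toList
  · rw [if_pos (hA1.mpr hc1),
      if_pos (⟨hlen2.mpr hc1.1, hmemset.mpr (Or.inl hc1.2)⟩ :
        2 ≤ (PySem.Chars.splitOn out [' ']).length ∧ _)]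
    rw [hlast]
    rw [show (" S.P.A.".toList = ' ' :: "S.P.A.".toList) from by decide]
    exact pvPos out "SPA".toList "S.P.A.".toList (by decide) hc1.1 hc1.2 (by decide)
  · by_cases hc2 : ' ' ∈ out ∧ PySem.Chars.upper (pvTail ' ' out) = "SRL".toList
    · rw [if_neg (hA1.not.mpr hc1), if_pos (hA2.mpr hc2),
        if_pos (⟨hlen2.mpr hc2.1, hmemset.mpr (Or.inr (Or.inl hc2.2))⟩ :
          2 ≤ (PySem.Chars.splitOn out [' ']).length ∧ _)]
      rw [hlast]
      rw [show (" S.R.L.".toList = ' ' :: "S.R.L.".toList) from by decide]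
      exact pvPos out "SRL".toList "S.R.L.".toList (by decide) hc2.1 hc2.2 (by decide)
    · by_cases hc3 : ' ' ∈ out ∧ PySem.Chars.upper (pvTail ' ' out) = "SAS".toList
      · rw [if_neg (hA1.not.mpr hc1), if_neg (hA2.not.mpr hc2), if_pos (hA3.mpr hc3),
          if_pos (⟨hlen2.mpr hc3.1, hmemset.mpr (Or.inr (Or.inr (Or.inl hc3.2)))⟩ :
            2 ≤ (PySem.Chars.splitOn out [' ']).length ∧ _)]
        rw [hlast]
        rw [show (" S.A.S.".toList = ' ' :: "S.A.S.".toList) from by decide]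
        exact pvPos out "SAS".toList "S.A.S.".toList (by decide) hc3.1 hc3.2 (by decide)
      · by_cases hc4 : ' ' ∈ out ∧ PySem.Chars.upper (pvTail ' ' out) = "SNC".toList
        · rw [if_neg (hA1.not.mpr hc1), if_neg (hA2.not.mpr hc2), if_neg (hA3.not.mpr hc3),
            if_pos (hA4.mpr hc4),
            if_pos (⟨hlen2.mpr hc4.1, hmemset.mpr (Or.inr (Or.inr (Or.inr hc4.2)))⟩ :
              2 ≤ (PySem.Chars.splitOn out [' ']).length ∧ _)]
          rw [hlast]
          rw [show (" S.N.C.".toList = ' ' :: "S.N.C.".toList) from by decide]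
          exact pvPos out "SNC".toList "S.N.C.".toList (by decide) hc4.1 hc4.2 (by decide)
        · rw [if_neg (hA1.not.mpr hc1), if_neg (hA2.not.mpr hc2), if_neg (hA3.not.mpr hc3),
            if_neg (hA4.not.mpr hc4)]
          rw [if_neg ?_]
          rintro ⟨hl2, hm⟩
          rcases hmemset.mp hm with h | h | h | h
          · exact hc1 ⟨hlen2.mp hl2, h⟩
          · exact hc2 ⟨hlen2.mp hl2, h⟩
          · exact hc3 ⟨hlen2.mp hl2, h⟩
          · exact hc4 ⟨hlen2.mp hl2, h⟩

-- ===== VERDICT (by name: the statement is the Claim_ definition above) =====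
theorem normalise_punctuation_py_spec : Claim_equal_normalise_punctuation_py := by
  intro name _
  show normalise_punctuation_py name = normalise_punctuation_py_alt name
  unfold normalise_punctuation_py normalise_punctuation_py_alt
  rw [pvCore_eq]
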